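-- pv_equiv track=rewrite | github.com/Tokyo113/leetcode_python | code_06_smallSum.py | merge_method
-- ===== SOURCE A (Python) =====
-- def merge_method(arr):
--     """
--     基于归并排序的思想：
--     代码和归并排序完全一样
--     :param arr:
--     """
--
--     if len(arr) == 1:
--         res = 0
--         return arr, res
--
--     mid = len(arr) >> 1
--     arr_left, res_left = merge_method(arr[:mid])
--     arr_right, res_right = merge_method(arr[mid:])
--     res = res_left + res_right
--     list = []
--     p_left, p_right = 0, 0
--     while (p_left < len(arr_left) and p_right < len(arr_right)):
--         if arr_left[p_left] < arr_right[p_right]: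
--             list.append(arr_left[p_left])
--             res += arr_left[p_left] * (len(arr_right) - p_right)
--             p_left += 1
--         else:
--             list.append(arr_right[p_right])
--             p_right += 1
--     list += arr_left[p_left:]
--     list += arr_right[p_right:]
--     return list, res
-- ===== SOURCE B (Python) =====
-- def merge_method(arr):
--     # Simpler re-implementation: small sum by its direct definition
--     # (each element times the number of strictly larger later elements),
--     # with the sorted list from the library sort.
--     total = 0
--     for i, x in enumerate(arr):
--         total += x * sum(1 for y in arr[i + 1:] if x < y)
--     return sorted(arr), total
-- ===== Notes on version B (the rewrite author's own statement) =====
-- stated objective: simpler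
-- what changed: Replaces the recursive merge sort that interleaves counting with merging by the library sort plus a direct two-line pairwise sum (each element times the count of strictly larger later elements).
import Mathlib
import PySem

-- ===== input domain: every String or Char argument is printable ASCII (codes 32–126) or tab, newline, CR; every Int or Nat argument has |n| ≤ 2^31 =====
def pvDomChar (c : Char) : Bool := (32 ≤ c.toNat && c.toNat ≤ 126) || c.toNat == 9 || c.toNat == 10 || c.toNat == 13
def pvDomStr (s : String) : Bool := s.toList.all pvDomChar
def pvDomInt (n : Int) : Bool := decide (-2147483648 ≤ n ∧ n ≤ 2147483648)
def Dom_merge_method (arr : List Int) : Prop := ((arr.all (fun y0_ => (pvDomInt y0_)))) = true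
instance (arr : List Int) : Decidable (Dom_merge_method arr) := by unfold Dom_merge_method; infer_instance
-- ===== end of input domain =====

-- B replaces the recursive merge sort (which interleaves counting with merging) by the
-- library sort plus the direct pairwise definition of the small sum: simpler, not faster.


-- ===== PORT A =====
-- the while-loop of A: walks the two merged halves, appending the smaller head and adding
-- l * (remaining right length) whenever the left head is strictly smaller; the base cases
-- are the two 'list += leftovers' lines
def mergeLoop : List Int → List Int → List Int × Int
  | [], r => (r, 0)
  | l :: ls, [] => (l :: ls, 0)
  | l :: ls, r :: rs =>
      if l < r then
        let p := mergeLoop ls (r :: rs)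
        (l :: p.1, l * ((r :: rs).length : Int) + p.2)
      else
        let p := mergeLoop (l :: ls) rs
        (r :: p.1, p.2)

def merge_method (arr : List Int) : List Int × Int :=
  -- Python tests 'len(arr) == 1'; on [] it recurses forever (RecursionError, excluded by
  -- Pre_), so the total port uses '≤ 1' and returns ([], 0) there; on every other input
  -- this is exactly the Python branch.  arr[:mid]/arr[mid:] with 0 ≤ mid ≤ len = take/drop.
  if _h : arr.length ≤ 1 then (arr, 0)
  else
    let mid := arr.length >>> 1
    let pl := merge_method (arr.take mid)
    let pr := merge_method (arr.drop mid)
    let p := mergeLoop pl.1 pr.1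
    (p.1, pl.2 + pr.2 + p.2)
termination_by arr.length
decreasing_by
  all_goals simp only [List.length_take, List.length_drop, Nat.shiftRight_eq_div_pow, pow_one]
  all_goals omega

-- ===== PORT B =====
-- Source B's loop: for each element, add it times the number of strictly larger later elements
def smallSumB : List Int → Int
  | [] => 0
  | x :: xs => x * ((xs.filter (fun y => decide (x < y))).length : Int) + smallSumB xs

def merge_method_alt (arr : List Int) : List Int × Int :=
  (PySem.List.sorted arr (fun y => y) false, smallSumB arr)

-- ===== PRECONDITION & SPEC =====
-- Pre_ excludes only the empty list, on which A raises RecursionError.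
def Pre_merge_method (arr : List Int) : Prop := arr ≠ []
instance (arr : List Int) : Decidable (Pre_merge_method arr) := by unfold Pre_merge_method; infer_instance
def pvWitness_merge_method : List Int := [3, 1, 2]

def Spec_merge_method (arr : List Int) (out : List Int × Int) : Prop := out = merge_method_alt arr
instance (arr : List Int) (out : List Int × Int) : Decidable (Spec_merge_method arr out) := by unfold Spec_merge_method; infer_instance

-- ===== CLAIM (what is proved, stated in full; the proofs are below) =====
def Claim_equal_merge_method : Prop := ∀ (arr : List Int), Dom_merge_method arr → Pre_merge_method arr → Spec_merge_method arr (merge_method arr)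

-- ===== LEMMAS AND PROOFS =====

-- the cross term A's merge loop accumulates: Σ_{x ∈ L} x · #{y ∈ R | x < y}
def cross (L R : List Int) : Int :=
  (L.map (fun x => x * ((R.filter (fun y => decide (x < y))).length : Int))).sum

theorem mergeLoop_perm (L R : List Int) : (mergeLoop L R).1.Perm (L ++ R) := by
  fun_induction mergeLoop L R with
  | case1 r => simp
  | case2 l ls => simp
  | case3 l ls r rs hlt p ih => simpa using ih.cons l
  | case4 l ls r rs hlt p ih => exact (ih.cons r).trans (List.Perm.symm List.perm_middle)

theorem mergeLoop_sorted (L R : List Int)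
    (hL : L.Pairwise (· ≤ ·)) (hR : R.Pairwise (· ≤ ·)) :
    (mergeLoop L R).1.Pairwise (· ≤ ·) := by
  fun_induction mergeLoop L R with
  | case1 r => exact hR
  | case2 l ls => exact hL
  | case3 l ls r rs hlt p ih =>
      refine List.Pairwise.cons ?_ (ih hL.of_cons hR)
      intro y hy
      rcases List.mem_append.mp ((mergeLoop_perm ls (r :: rs)).mem_iff.mp hy) with h1 | h1
      · exact List.rel_of_pairwise_cons hL h1
      · rcases List.mem_cons.mp h1 with rfl | h2
        · exact le_of_lt hlt
        · exact le_of_lt (lt_of_lt_of_le hlt (List.rel_of_pairwise_cons hR h2))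
  | case4 l ls r rs hlt p ih =>
      refine List.Pairwise.cons ?_ (ih hL hR.of_cons)
      intro y hy
      rcases List.mem_append.mp ((mergeLoop_perm (l :: ls) rs).mem_iff.mp hy) with h1 | h1
      · rcases List.mem_cons.mp h1 with rfl | h2
        · omega
        · exact le_trans (by omega) (List.rel_of_pairwise_cons hL h2)
      · exact List.rel_of_pairwise_cons hR h1

theorem mergeLoop_snd (L R : List Int)
    (hL : L.Pairwise (· ≤ ·)) (hR : R.Pairwise (· ≤ ·)) :
    (mergeLoop L R).2 = cross L R := by
  fun_induction mergeLoop L R with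
  | case1 r => simp [cross]
  | case2 l ls => simp [cross]
  | case3 l ls r rs hlt p ih =>
      -- l < r ≤ every element of r::rs, so the filter keeps all of r::rs
      have hall : (r :: rs).filter (fun y => decide (l < y)) = r :: rs := by
        apply List.filter_eq_self.mpr
        intro y hy
        rcases List.mem_cons.mp hy with rfl | h2
        · simpa using hlt
        · simpa using lt_of_lt_of_le hlt (List.rel_of_pairwise_cons hR h2)
      simp only [cross, List.map_cons, List.sum_cons] at *
      rw [ih hL.of_cons hR, hall]
  | case4 l ls r rs hlt p ih =>
      -- r ≤ l ≤ every element of l::ls, so r contributes to no left element's filter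
      have hnone : ∀ x ∈ l :: ls, ((r :: rs).filter (fun y => decide (x < y))) = rs.filter (fun y => decide (x < y)) := by
        intro x hx
        have hrx : r ≤ x := by
          rcases List.mem_cons.mp hx with rfl | h2
          · omega
          · exact le_trans (by omega) (List.rel_of_pairwise_cons hL h2)
        simp [not_lt.mpr hrx]
      rw [ih hL hR.of_cons]
      unfold cross
      congr 1
      apply List.map_congr_left
      intro x hx
      rw [hnone x hx]

theorem cross_perm_left {L L' : List Int} (R : List Int) (h : L.Perm L') :
    cross L R = cross L' R := (h.map _).sum_eq

theorem cross_perm_right (L : List Int) {R R' : List Int} (h : R.Perm R') :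
    cross L R = cross L R' := by
  unfold cross
  congr 1
  apply List.map_congr_left
  intro x _
  rw [(h.filter _).length_eq]

theorem smallSumB_append (L R : List Int) :
    smallSumB (L ++ R) = smallSumB L + smallSumB R + cross L R := by
  induction L with
  | nil => simp [smallSumB, cross]
  | cons x xs ih =>
      simp only [List.cons_append, smallSumB, ih, cross, List.map_cons, List.sum_cons,
        List.filter_append, List.length_append]
      push_cast
      ring

theorem merge_method_eq (arr : List Int) :
    merge_method arr = (PySem.List.sorted arr (fun y => y) false, smallSumB arr) := by
  fun_induction merge_method arr with
  | case1 arr h1 =>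
      match arr, h1 with
      | [], _ => simp [smallSumB, PySem.List.sorted]
      | [a], _ =>
          have hs : PySem.List.sorted [a] (fun y => y) false = [a] :=
            PySem.List.sorted_id_eq_of_perm_of_pairwise _ _ (List.Perm.refl _) (by simp)
          simp [smallSumB, hs]
  | case2 arr h1 mid pl pr p ihT ihD =>
      have hT := PySem.List.sorted_pairwise (xs := arr.take mid) (key := fun y => y)
      have hD := PySem.List.sorted_pairwise (xs := arr.drop mid) (key := fun y => y)
      have hpT := PySem.List.sorted_perm (xs := arr.take mid) (key := fun y => y) (rev := false)
      have hpD := PySem.List.sorted_perm (xs := arr.drop mid) (key := fun y => y) (rev := false)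
      have hperm : (mergeLoop (PySem.List.sorted (arr.take mid) (fun y => y) false)
          (PySem.List.sorted (arr.drop mid) (fun y => y) false)).1.Perm arr := by
        refine (mergeLoop_perm _ _).trans ((hpT.append hpD).trans ?_)
        rw [List.take_append_drop]
      have hfst := PySem.List.sorted_id_eq_of_perm_of_pairwise _ _ hperm (mergeLoop_sorted _ _ hT hD)
      have hsnd := mergeLoop_snd _ _ hT hD
      have hcr : cross (PySem.List.sorted (arr.take mid) (fun y => y) false)
          (PySem.List.sorted (arr.drop mid) (fun y => y) false) = cross (arr.take mid) (arr.drop mid) := by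
        rw [cross_perm_left _ hpT, cross_perm_right _ hpD]
      have hsum : smallSumB arr = smallSumB (arr.take mid) + smallSumB (arr.drop mid) + cross (arr.take mid) (arr.drop mid) := by
        conv_lhs => rw [← List.take_append_drop mid arr]
        exact smallSumB_append _ _
      simp only [p, pl, pr, ihT, ihD]
      rw [Prod.ext_iff]
      exact ⟨hfst.symm, by rw [hsnd, hcr, hsum]⟩

-- ===== VERDICT (by name: the statement is the Claim_ definition above) =====
theorem merge_method_spec : Claim_equal_merge_method := by
  intro arr _ _
  unfold Spec_merge_method merge_method_alt
  exact merge_method_eq arr
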